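-- pv_equiv track=rewrite | github.com/123rrr4tttt/market-research-workflow | main/backend/app/services/resource_pool/unified_search.py | _filter_urls_by_terms
-- ===== SOURCE A (Python) =====
-- def _filter_urls_by_terms(urls: list[str], terms: list[str]) -> list[str]:
--     if not terms:
--         return urls
--     t = [x.lower() for x in terms if x]
--     out: list[str] = []
--     for u in urls:
--         lu = u.lower()
--         if any(term in lu for term in t):
--             out.append(u)
--     return out
-- ===== SOURCE B (Python) =====
-- def _filter_urls_by_terms(urls: list[str], terms: list[str]) -> list[str]:
--     if not terms:
--         return urls
--     t = [x.lower() for x in terms if x]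
--
--     def hit(lu: str) -> bool:
--         # position-major scan: walk the url once, at each position try every term as a prefix
--         for i in range(len(lu) + 1):
--             for term in t:
--                 if lu.startswith(term, i):
--                     return True
--         return False
--
--     return [u for u in urls if hit(u.lower())]
-- ===== Notes on version B (the rewrite author's own statement) =====
-- stated objective: alternative
-- what changed: A asks term-by-term whether each lowered term is a substring of the lowered url (library 'in' scan per term); B lowers each url once and makes a single position-major scan, testing every term as a prefix at each position (a hand-rolled multi-pattern matcher), collecting matches with a comprehension instead of an append loop.
import Mathlib
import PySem

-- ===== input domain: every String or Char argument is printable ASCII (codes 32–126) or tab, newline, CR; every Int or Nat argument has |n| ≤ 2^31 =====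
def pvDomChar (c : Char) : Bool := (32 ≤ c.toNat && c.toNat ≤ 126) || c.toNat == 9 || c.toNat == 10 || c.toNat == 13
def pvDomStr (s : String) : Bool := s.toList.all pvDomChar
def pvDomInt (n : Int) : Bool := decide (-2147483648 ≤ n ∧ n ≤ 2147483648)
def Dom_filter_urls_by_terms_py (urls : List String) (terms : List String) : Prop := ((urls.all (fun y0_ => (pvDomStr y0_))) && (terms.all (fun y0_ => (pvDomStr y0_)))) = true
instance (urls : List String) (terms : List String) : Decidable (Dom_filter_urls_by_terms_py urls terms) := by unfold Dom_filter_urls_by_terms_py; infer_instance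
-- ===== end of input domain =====

-- B replaces the per-term substring test with one position-major prefix scan per lowered url (alternative algorithm, same exact result).

-- ===== PORT A =====
def filter_urls_by_terms_py (urls : List String) (terms : List String) : List String :=
  if terms = [] then urls
  else
    let t := (terms.filter (fun x => x ≠ "")).map PySem.Str.lower
    urls.foldl (fun out u =>
      let lu := PySem.Str.lower u
      if t.any (fun term => PySem.Str.isIn term lu) then out ++ [u] else out) []

-- ===== PORT B =====
-- lu.startswith(term, i) with 0 ≤ i ≤ len(lu) is exactly 'term is a prefix of lu[i:]' (List.isPrefixOf on the char lists)
def pvHit (t : List (List Char)) (lu : List Char) : Bool :=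
  (List.range (lu.length + 1)).any (fun i => t.any (fun term => term.isPrefixOf (lu.drop i)))

def filter_urls_by_terms_py_alt (urls : List String) (terms : List String) : List String :=
  if terms = [] then urls
  else
    let t := (terms.filter (fun x => x ≠ "")).map (fun x => PySem.Chars.lower x.toList)
    urls.filter (fun u => pvHit t (PySem.Chars.lower u.toList))

-- ===== PRECONDITION & SPEC =====
def Spec_filter_urls_by_terms_py (urls : List String) (terms : List String) (out : List String) : Prop := out = filter_urls_by_terms_py_alt urls terms
instance (urls : List String) (terms : List String) (out : List String) : Decidable (Spec_filter_urls_by_terms_py urls terms out) := by unfold Spec_filter_urls_by_terms_py; infer_instance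

-- ===== CLAIM (what is proved, stated in full; the proofs are below) =====
def Claim_equal_filter_urls_by_terms_py : Prop := ∀ (urls : List String) (terms : List String), Dom_filter_urls_by_terms_py urls terms → Spec_filter_urls_by_terms_py urls terms (filter_urls_by_terms_py urls terms)

-- ===== LEMMAS AND PROOFS =====

-- a bounded position i ≤ |L| with sub a prefix of L.drop i is the same as sub being an infix of L
lemma pv_prefix_drop_bounded (sub L : List Char) :
    (∃ i, i < L.length + 1 ∧ sub <+: L.drop i) ↔ sub <:+: L := by
  constructor
  · rintro ⟨i, _, h⟩
    exact (PySem.Chars.isIn_iff_infix sub L).mp ((PySem.Chars.exists_prefix_drop_iff_isIn sub L).mp ⟨i, h⟩)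
  · intro h
    obtain ⟨j, hj⟩ := (PySem.Chars.exists_prefix_drop_iff_isIn sub L).mpr ((PySem.Chars.isIn_iff_infix sub L).mpr h)
    by_cases hle : j ≤ L.length
    · exact ⟨j, by omega, hj⟩
    · refine ⟨L.length, by omega, ?_⟩
      have hnil : L.drop j = [] := List.drop_eq_nil_of_le (by omega)
      simpa [List.drop_length, hnil] using hj

-- B's position-major scan finds a hit iff some pattern in t is a substring of L
lemma pvHit_eq_any_isIn (t : List (List Char)) (L : List Char) :
    pvHit t L = t.any (fun sub => PySem.Chars.isIn sub L) := by
  rw [Bool.eq_iff_iff]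
  simp only [pvHit, List.any_eq_true, List.mem_range, List.isPrefixOf_iff_prefix,
    PySem.Chars.isIn_iff_infix]
  constructor
  · rintro ⟨i, hi, sub, hmem, hpre⟩
    exact ⟨sub, hmem, (pv_prefix_drop_bounded sub L).mp ⟨i, hi, hpre⟩⟩
  · rintro ⟨sub, hmem, hinf⟩
    obtain ⟨i, hi, hpre⟩ := (pv_prefix_drop_bounded sub L).mpr hinf
    exact ⟨i, hi, sub, hmem, hpre⟩

-- ===== VERDICT (by name: the statement is the Claim_ definition above) =====
theorem filter_urls_by_terms_py_spec : Claim_equal_filter_urls_by_terms_py := by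
  intro urls terms _
  unfold Spec_filter_urls_by_terms_py filter_urls_by_terms_py filter_urls_by_terms_py_alt
  by_cases hterms : terms = []
  · simp [hterms]
  · simp only [hterms, ite_false]
    rw [PySem.List.foldl_append_if_eq_filter]
    rw [List.nil_append]
    apply List.filter_congr
    intro u _
    rw [pvHit_eq_any_isIn]
    simp [List.any_map, PySem.Str.isIn_eq, PySem.Str.toList_lower, Function.comp]
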